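-- pv_equiv track=rewrite | github.com/AustinDataSolutions/cb-audit-app | audit-report-summarizer.py | _get_topics_sheet_name
-- ===== SOURCE A (Python) =====
-- def _get_topics_sheet_name(sheet_names):
--     for name in sheet_names:
--         lowered = name.casefold()
--         if lowered in ("findings", "topics"):
--             return name
--     for name in sheet_names:
--         if name.casefold() == "categories":
--             return name
--     raise ValueError("Audit file does not include a Topics/Findings worksheet.")
-- ===== SOURCE B (Python) =====
-- def _get_topics_sheet_name(sheet_names):
--     fallback = None
--     for name in sheet_names:
--         lowered = name.casefold()
--         if lowered in ("findings", "topics"):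
--             return name
--         if lowered == "categories" and fallback is None:
--             fallback = name
--     if fallback is not None:
--         return fallback
--     raise ValueError("Audit file does not include a Topics/Findings worksheet.")
-- ===== Notes on version B (the rewrite author's own statement) =====
-- stated objective: alternative
-- what changed: Replaces A's two separate scans over sheet_names by a single traversal that returns findings/topics immediately and maintains the first 'categories' name as a saved fallback returned after the loop.
import Mathlib
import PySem

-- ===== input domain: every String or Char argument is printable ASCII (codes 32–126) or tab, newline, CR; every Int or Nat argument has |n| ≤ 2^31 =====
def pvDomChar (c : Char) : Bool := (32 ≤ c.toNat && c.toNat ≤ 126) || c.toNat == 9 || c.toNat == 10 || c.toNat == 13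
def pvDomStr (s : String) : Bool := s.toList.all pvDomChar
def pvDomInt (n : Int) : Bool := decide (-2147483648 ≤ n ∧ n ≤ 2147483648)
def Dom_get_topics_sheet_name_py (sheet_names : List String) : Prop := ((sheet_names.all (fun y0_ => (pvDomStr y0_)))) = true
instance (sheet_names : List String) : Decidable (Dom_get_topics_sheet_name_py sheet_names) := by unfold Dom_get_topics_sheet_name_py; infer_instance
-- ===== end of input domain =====

-- ===== PORT A =====
-- One honest line: B replaces A's two scans with a single traversal carrying a first-'categories' fallback (alternative decomposition, same cost).
-- first loop of A: return the first name whose casefold is "findings" or "topics"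
def pvAscan1 : List String → Option String
  | [] => none
  | n :: rest =>
    let lowered := PySem.Str.lower n
    if lowered = "findings" ∨ lowered = "topics" then some n else pvAscan1 rest

-- second loop of A: return the first name whose casefold is "categories"
def pvAscan2 : List String → Option String
  | [] => none
  | n :: rest =>
    if PySem.Str.lower n = "categories" then some n else pvAscan2 rest

-- the final 'raise ValueError' is excluded by Pre_; .getD "" is never reached inside Pre_
def get_topics_sheet_name_py (sheet_names : List String) : String :=
  (match pvAscan1 sheet_names with
   | some n => some n
   | none => pvAscan2 sheet_names).getD ""

-- ===== PORT B =====
-- single loop of B over sheet_names with the saved fallback as accumulator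
def pvBloop : List String → Option String → Option String
  | [], fallback => fallback
  | n :: rest, fallback =>
    let lowered := PySem.Str.lower n
    if lowered = "findings" ∨ lowered = "topics" then some n
    else pvBloop rest
      (if lowered = "categories" ∧ fallback = none then some n else fallback)

-- B's final 'raise' is excluded by Pre_; .getD "" is never reached inside Pre_
def get_topics_sheet_name_py_alt (sheet_names : List String) : String :=
  (pvBloop sheet_names none).getD ""

-- ===== PRECONDITION & SPEC =====
-- Pre_ excludes exactly the inputs where A raises ValueError: no name casefolds to findings/topics/categories.
def Pre_get_topics_sheet_name_py (sheet_names : List String) : Prop :=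
  (sheet_names.any (fun n =>
    PySem.Str.lower n == "findings" || PySem.Str.lower n == "topics" ||
    PySem.Str.lower n == "categories")) = true

instance (sheet_names : List String) : Decidable (Pre_get_topics_sheet_name_py sheet_names) := by
  unfold Pre_get_topics_sheet_name_py; infer_instance

def pvWitness_get_topics_sheet_name_py : List String := ["Summary", "Topics"]

def Spec_get_topics_sheet_name_py (sheet_names : List String) (out : String) : Prop := out = get_topics_sheet_name_py_alt sheet_names
instance (sheet_names : List String) (out : String) : Decidable (Spec_get_topics_sheet_name_py sheet_names out) := by unfold Spec_get_topics_sheet_name_py; infer_instance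

-- ===== CLAIM =====
def Claim_equal_get_topics_sheet_name_py : Prop := ∀ (sheet_names : List String), Dom_get_topics_sheet_name_py sheet_names → Pre_get_topics_sheet_name_py sheet_names → Spec_get_topics_sheet_name_py sheet_names (get_topics_sheet_name_py sheet_names)

-- ===== LEMMAS AND PROOFS =====
-- B's loop equals: first findings/topics match, else the saved fallback, else the first categories match.
theorem pvBloop_eq (xs : List String) (fb : Option String) :
    pvBloop xs fb =
      (match pvAscan1 xs with
       | some n => some n
       | none => match fb with
                 | some x => some x
                 | none => pvAscan2 xs) := by
  induction xs generalizing fb with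
  | nil => cases fb <;> simp [pvBloop, pvAscan1, pvAscan2]
  | cons n rest ih =>
    simp only [pvBloop, pvAscan1, pvAscan2]
    by_cases h1 : PySem.Str.lower n = "findings" ∨ PySem.Str.lower n = "topics"
    · simp [h1]
    · by_cases hc : PySem.Str.lower n = "categories"
      · cases fb <;> simp [hc, ih]
      · cases fb <;> simp [h1, hc, ih]

-- ===== VERDICT =====
theorem get_topics_sheet_name_py_spec : Claim_equal_get_topics_sheet_name_py := by
  intro xs _ _
  unfold Spec_get_topics_sheet_name_py get_topics_sheet_name_py get_topics_sheet_name_py_alt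
  rw [pvBloop_eq]
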